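-- pv_equiv track=rewrite | github.com/BlackMonkee/12-Records | Record 2.py | bi
-- ===== SOURCE A (Python) =====
-- def bi(t):
--     o=len(t)
--     l=[]
--     for i in range (o):
--         t2=t[i][::-1]
--         for j in range(i,o):
--             if t[j]==t2:
--                 #l+=t[i], this line or next line both are same
--                 l+=t2,
--     return(l)
-- ===== SOURCE B (Python) =====
-- def bi(t):
--     n = len(t)
--     cnt = {}
--     reps = [0] * n
--     for i in range(n - 1, -1, -1):
--         s = t[i]
--         cnt[s] = cnt.get(s, 0) + 1
--         reps[i] = cnt.get(s[::-1], 0)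
--     out = []
--     for i in range(n):
--         out += [t[i][::-1]] * reps[i]
--     return out
-- ===== Notes on version B (the rewrite author's own statement) =====
-- stated objective: faster
-- what changed: Replaces A's nested loop (for each i, rescan t[i:] for matches of the reversed string) by one backward pass maintaining a suffix-count dict, then one forward pass emitting each reversed string count-many times.
import Mathlib
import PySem

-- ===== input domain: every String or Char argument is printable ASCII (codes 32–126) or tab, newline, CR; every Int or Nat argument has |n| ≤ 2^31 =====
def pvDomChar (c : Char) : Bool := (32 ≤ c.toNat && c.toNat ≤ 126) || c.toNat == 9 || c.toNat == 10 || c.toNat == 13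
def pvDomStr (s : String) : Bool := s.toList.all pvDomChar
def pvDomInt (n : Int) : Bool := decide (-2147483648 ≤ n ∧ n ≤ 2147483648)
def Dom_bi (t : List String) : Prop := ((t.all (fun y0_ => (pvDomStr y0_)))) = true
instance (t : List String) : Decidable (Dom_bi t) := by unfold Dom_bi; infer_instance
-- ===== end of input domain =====

-- B replaces A's quadratic scan of the tail for each index by one backward pass that
-- maintains a suffix counter dict, then emits each reversed string count-many times (asymptotic speed-up).

-- s[::-1]  (step -1 slice never fails, so the `some` is unwrapped with getD)
def pyRev (s : String) : String := (PySem.Str.slice? s none none (-1)).getD s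

-- ===== PORT A =====
def bi (t : List String) : List String :=
  let o : Int := (t.length : Int)
  (PySem.List.pyRange 0 o).foldl (fun l i =>
    let t2 := pyRev (PySem.List.pyGetD t i "")
    (PySem.List.pyRange i o).foldl (fun l j =>
      if PySem.List.pyGetD t j "" == t2 then l ++ [t2] else l) l) []

-- ===== PORT B =====
-- backward pass of Source B: processes the list from the right, returning the suffix counter
-- and the list reps with reps[i] = cnt.get(t[i][::-1], 0) taken just after counting t[i]
def biRepsGo : List String → PySem.Dict String Nat × List Nat
  | [] => (PySem.Dict.empty, [])
  | s :: rest =>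
    let p := biRepsGo rest
    let cnt := p.1.insert s (p.1.getD s 0 + 1)
    (cnt, cnt.getD (pyRev s) 0 :: p.2)

def bi_alt (t : List String) : List String :=
  (t.zip (biRepsGo t).2).foldl (fun out p => out ++ List.replicate p.2 (pyRev p.1)) []

-- ===== PRECONDITION & SPEC =====
def Spec_bi (t : List String) (out : List String) : Prop := out = bi_alt t
instance (t : List String) (out : List String) : Decidable (Spec_bi t out) := by unfold Spec_bi; infer_instance

-- ===== CLAIM (what is proved, stated in full; the proofs are below) =====
def Claim_equal_bi : Prop := ∀ (t : List String), Dom_bi t → Spec_bi t (bi t)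

-- ===== LEMMAS AND PROOFS =====

-- common reference form: for each suffix head s, its reversal repeated (count of rev s in the suffix)
def biSpec : List String → List String
  | [] => []
  | s :: rest => List.replicate ((s :: rest).count (pyRev s)) (pyRev s) ++ biSpec rest

-- B side ---------------------------------------------------------------
lemma biRepsGo_getD (l : List String) (k : String) : (biRepsGo l).1.getD k 0 = l.count k := by
  induction l with
  | nil => simp [biRepsGo]
  | cons s rest ih =>
    simp only [biRepsGo]
    by_cases h : k = s
    · subst h
      rw [PySem.Dict.getD_insert, if_pos rfl, ih, List.count_cons]
      simp
    · rw [PySem.Dict.getD_insert, if_neg h, ih, List.count_cons]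
      have hb : (s == k) = false := by
        simp only [beq_eq_false_iff_ne]; exact fun e => h e.symm
      simp [hb]

lemma bi_alt_flat (t : List String) :
    bi_alt t = (t.zip (biRepsGo t).2).flatMap (fun p => List.replicate p.2 (pyRev p.1)) := by
  simpa [bi_alt] using
    PySem.List.foldl_append_eq_flatMap (fun p : String × Nat => List.replicate p.2 (pyRev p.1))
      (t.zip (biRepsGo t).2) []

lemma bi_alt_eq_spec (t : List String) : bi_alt t = biSpec t := by
  induction t with
  | nil => simp [bi_alt, biRepsGo, biSpec]
  | cons s rest ih =>
    rw [bi_alt_flat] at ih ⊢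
    have hc : (biRepsGo (s :: rest)).2
        = (s :: rest).count (pyRev s) :: (biRepsGo rest).2 := by
      have := biRepsGo_getD (s :: rest) (pyRev s)
      simp only [biRepsGo] at this ⊢
      rw [this]
    rw [hc]
    simp only [List.zip_cons_cons, List.flatMap_cons, biSpec, ih]

-- A side ---------------------------------------------------------------
lemma countP_suffix (t : List String) (v : String) :
    ∀ k i : Nat, t.length - i = k → i ≤ t.length →
      List.countP (fun j => PySem.List.pyGetD t j "" == v)
        (PySem.List.pyRange (i : Int) (t.length : Int)) = (t.drop i).count v := by
  intro k
  induction k with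
  | zero =>
    intro i hk hi
    have : i = t.length := by omega
    subst this
    simp [PySem.List.pyRange, List.count_nil]
  | succ m ih =>
    intro i hk hi
    have hlt : i < t.length := by omega
    rw [PySem.List.pyRange_one_cons (by exact_mod_cast hlt), List.countP_cons,
        List.drop_eq_getElem_cons hlt, List.count_cons]
    have h1 : ((i : Int) + 1) = ((i + 1 : Nat) : Int) := by push_cast; ring
    rw [h1, ih (i + 1) (by omega) (by omega)]
    have h2 : PySem.List.pyGetD t (i : Int) "" = t[i] := by
      rw [PySem.List.pyGetD_natCast]
      exact List.getD_eq_getElem t "" hlt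
    rw [h2]

lemma bi_flat (t : List String) :
    bi t = (List.range t.length).flatMap (fun i =>
      List.replicate ((t.drop i).count (pyRev (t.getD i "")))
        (pyRev (t.getD i ""))) := by
  unfold bi
  have h1 : (fun (l : List String) (i : Int) =>
      (PySem.List.pyRange i (t.length : Int)).foldl (fun l j =>
        if PySem.List.pyGetD t j "" == pyRev (PySem.List.pyGetD t i "") then
          l ++ [pyRev (PySem.List.pyGetD t i "")] else l) l)
      = (fun (l : List String) (i : Int) => l ++
        ((PySem.List.pyRange i (t.length : Int)).filter
            (fun j => PySem.List.pyGetD t j "" == pyRev (PySem.List.pyGetD t i ""))).map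
          (fun _ => pyRev (PySem.List.pyGetD t i ""))) := by
    funext l i
    exact PySem.List.foldl_append_if _ (fun _ => pyRev (PySem.List.pyGetD t i "")) _ _
  simp only [h1]
  rw [PySem.List.foldl_append_eq_flatMap, List.nil_append,
      PySem.List.pyRange_zero_natCast, List.flatMap_map]
  apply List.flatMap_congr
  intro i hi
  have hlt : i < t.length := List.mem_range.mp hi
  rw [List.map_const', ← List.countP_eq_length_filter]
  rw [countP_suffix t _ (t.length - i) i rfl (by omega)]
  rw [PySem.List.pyGetD_natCast]

lemma flat_eq_spec (t : List String) :
    (List.range t.length).flatMap (fun i =>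
      List.replicate ((t.drop i).count (pyRev (t.getD i "")))
        (pyRev (t.getD i ""))) = biSpec t := by
  induction t with
  | nil => simp [biSpec]
  | cons s rest ih =>
    rw [List.length_cons, List.range_succ_eq_map, List.flatMap_cons, List.flatMap_map]
    simp only [List.getD_cons_succ, List.drop_succ_cons, Nat.succ_eq_add_one]
    rw [ih]
    simp [biSpec]

-- ===== VERDICT (by name: the statement is the Claim_ definition above) =====
theorem bi_spec : Claim_equal_bi := by
  intro t _
  unfold Spec_bi
  rw [bi_flat, flat_eq_spec, bi_alt_eq_spec]
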